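-- pv_equiv track=rewrite | github.com/AndreaFrasson/Feedback-Loop-for-POI-RS | metrics.py | _explore_return
-- ===== SOURCE A (Python) =====
-- def _explore_return(traj):
--     explore = set()
--     returns = 0
--     for l in traj:
--         if l not in explore:
--             explore.add(l)
--         else:
--             returns+=1
--     return len(explore), returns
-- ===== SOURCE B (Python) =====
-- def _explore_return(traj):
--     s = sorted(traj)
--     returns = sum(1 for a, b in zip(s, s[1:]) if a == b)
--     return len(s) - returns, returns
-- ===== Notes on version B (the rewrite author's own statement) =====
-- stated objective: alternative
-- what changed: Instead of a single pass maintaining a seen-set and a counter, B sorts the trajectory so duplicates become adjacent and counts repeat visits as the number of adjacent equal pairs; uniques = len - repeats.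
import Mathlib
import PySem

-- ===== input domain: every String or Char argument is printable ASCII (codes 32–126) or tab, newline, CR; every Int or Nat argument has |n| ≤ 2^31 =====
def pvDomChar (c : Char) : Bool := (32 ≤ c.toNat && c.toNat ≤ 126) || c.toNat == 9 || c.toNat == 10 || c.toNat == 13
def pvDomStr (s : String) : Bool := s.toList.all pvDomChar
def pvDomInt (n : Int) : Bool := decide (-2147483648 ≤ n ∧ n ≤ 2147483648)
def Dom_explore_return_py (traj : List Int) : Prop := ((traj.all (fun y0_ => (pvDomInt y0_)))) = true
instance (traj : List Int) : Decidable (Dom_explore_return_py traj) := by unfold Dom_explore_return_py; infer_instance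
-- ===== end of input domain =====

-- B sorts the trajectory and counts repeat visits as adjacent equal pairs (uniques = len - repeats); objective: alternative algorithm, same result.

-- ===== PORT A =====
def explore_return_py (traj : List Int) : Int × Int :=
  let st := traj.foldl
    (fun (st : PySem.Set Int × Int) l =>
      if ¬ PySem.Set.contains st.1 l then (PySem.Set.add st.1 l, st.2)
      else (st.1, st.2 + 1))
    (PySem.Set.empty, 0)
  (PySem.Set.len st.1, st.2)

-- ===== PORT B =====
def explore_return_py_alt (traj : List Int) : Int × Int :=
  let s := PySem.List.sorted traj (fun x => x) false
  let returns : Int :=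
    ((s.zip (PySem.List.slice s (some 1) none)).countP (fun p => p.1 == p.2) : Int)
  ((s.length : Int) - returns, returns)

-- ===== PRECONDITION & SPEC =====
def Spec_explore_return_py (traj : List Int) (out : Int × Int) : Prop := out = explore_return_py_alt traj
instance (traj : List Int) (out : Int × Int) : Decidable (Spec_explore_return_py traj out) := by unfold Spec_explore_return_py; infer_instance

-- ===== CLAIM (what is proved, stated in full; the proofs are below) =====
def Claim_equal_explore_return_py : Prop := ∀ (traj : List Int), Dom_explore_return_py traj → Spec_explore_return_py traj (explore_return_py traj)

-- ===== LEMMAS AND PROOFS =====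

theorem pv_add_contains (s : PySem.Set Int) (a : Int) (h : PySem.Set.contains s a = true) :
    PySem.Set.add s a = s := by
  have hm : a ∈ s := by simpa [PySem.Set.contains] using h
  exact PySem.Set.add_of_mem hm

theorem pv_len_add_not_contains (s : PySem.Set Int) (a : Int) (h : ¬ PySem.Set.contains s a = true) :
    PySem.Set.len (PySem.Set.add s a) = PySem.Set.len s + 1 := by
  have hm : a ∉ s := by simpa [PySem.Set.contains] using h
  simp [PySem.Set.add_of_not_mem hm, PySem.Set.len]

-- A's loop computes (set of prefix ∪ s, running repeat count)
theorem pv_foldl_inv (traj : List Int) :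
    ∀ (s : PySem.Set Int) (r : Int),
      traj.foldl
        (fun (st : PySem.Set Int × Int) l =>
          if ¬ PySem.Set.contains st.1 l then (PySem.Set.add st.1 l, st.2)
          else (st.1, st.2 + 1))
        (s, r)
      = (PySem.Set.update s traj,
         r + ((traj.length : Int) + PySem.Set.len s - PySem.Set.len (PySem.Set.update s traj))) := by
  induction traj with
  | nil => intro s r; simp [PySem.Set.update]
  | cons a t ih =>
    intro s r
    rw [List.foldl_cons]
    by_cases h : PySem.Set.contains s a = true
    · have hadd : PySem.Set.add s a = s := pv_add_contains s a h
      rw [if_neg (by simpa [PySem.Set.contains] using h), ih]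
      have hu : PySem.Set.update s (a :: t) = PySem.Set.update s t := by
        simp [PySem.Set.update, hadd]
      rw [hu]
      simp only [Prod.mk.injEq, List.length_cons, true_and]
      push_cast
      ring
    · rw [if_pos (by simp [PySem.Set.contains] at h ⊢; exact h), ih]
      have hu : PySem.Set.update s (a :: t) = PySem.Set.update (PySem.Set.add s a) t := by
        simp [PySem.Set.update]
      rw [hu]
      simp only [Prod.mk.injEq, List.length_cons, true_and]
      rw [pv_len_add_not_contains s a h]
      push_cast
      ring

-- |set(xs)| = card of the finset of xs
theorem pv_len_ofList (xs : List Int) :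
    (PySem.Set.ofList xs).length = xs.toFinset.card := by
  have hn : (PySem.Set.ofList xs).Nodup := PySem.Set.nodup_ofList xs
  have hf : (PySem.Set.ofList xs).toFinset = xs.toFinset := by
    ext y
    simp [PySem.Set.mem_ofList]
  rw [← List.toFinset_card_of_nodup hn, hf]

-- on a ≤-sorted list, adjacent equal pairs + distinct values = length
theorem pv_adj_sorted (s : List Int) (hs : s.Pairwise (· ≤ ·)) :
    (s.zip s.tail).countP (fun p => p.1 == p.2) + s.toFinset.card = s.length := by
  induction s with
  | nil => simp
  | cons a t ih =>
    cases t with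
    | nil => simp
    | cons b u =>
      have hab : a ≤ b := (List.pairwise_cons.1 hs).1 b (by simp)
      have hst : (b :: u).Pairwise (· ≤ ·) := (List.pairwise_cons.1 hs).2
      have ihr := ih hst
      simp only [List.tail_cons] at ihr
      by_cases hab' : a = b
      · subst hab'
        simp only [List.zip_cons_cons, List.tail_cons, List.countP_cons,
          beq_self_eq_true]
        simp only [if_true]
        rw [List.toFinset_cons, Finset.insert_eq_self.2 (by simp)]
        simp only [List.length_cons] at ihr ⊢
        omega
      · have hnot : a ∉ (b :: u) := by
          intro hmem
          rcases List.mem_cons.1 hmem with h1 | h2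
          · exact hab' h1
          · have hbu : b ≤ a := (List.pairwise_cons.1 hst).1 a h2
            exact hab' (le_antisymm hab hbu)
        have hbeq : (a == b) = false := by simp [hab']
        simp only [List.zip_cons_cons, List.tail_cons, List.countP_cons, hbeq,
          ]
        rw [if_neg (by simp)]
        rw [List.toFinset_cons, Finset.card_insert_of_notMem (by simpa using hnot)]
        simp only [List.length_cons] at ihr ⊢
        omega

-- ===== VERDICT (by name: the statement is the Claim_ definition above) =====
theorem explore_return_py_spec : Claim_equal_explore_return_py := by
  intro traj _
  unfold Spec_explore_return_py explore_return_py explore_return_py_alt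
  rw [pv_foldl_inv traj PySem.Set.empty 0]
  simp only [PySem.Set.update, PySem.Set.empty]
  set s := PySem.List.sorted traj (fun x => x) false with hs
  have hperm : s.Perm traj := PySem.List.sorted_perm traj (fun x => x) false
  have hpw : s.Pairwise (· ≤ ·) := by
    simpa using PySem.List.sorted_pairwise traj (fun x => x)
  have hslice : PySem.List.slice s (some 1) none = s.tail := PySem.List.slice_from_one s
  have hlen : s.length = traj.length := hperm.length_eq
  have hfin : s.toFinset = traj.toFinset := List.toFinset_eq_of_perm _ _ hperm
  have hadj := pv_adj_sorted s hpw
  have hof : (PySem.Set.ofList traj).length = traj.toFinset.card := pv_len_ofList traj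
  have hofL : traj.foldl PySem.Set.add [] = PySem.Set.ofList traj := by
    rw [PySem.Set.ofList_eq_foldl]
  rw [hofL, hslice]
  have hcard_le : traj.toFinset.card ≤ traj.length := by
    calc traj.toFinset.card = s.toFinset.card := by rw [hfin]
    _ ≤ s.length := by omega
    _ = traj.length := hlen
  simp only [PySem.Set.len, hof]
  refine Prod.ext ?_ ?_
  · show ((traj.toFinset.card : Int)) = (s.length : Int) - _
    rw [hfin] at hadj
    omega
  · show (0 : Int) + ((traj.length : Int) + (0 : Int) - (traj.toFinset.card : Int)) = _
    rw [hfin] at hadj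
    omega
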